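-- pv_equiv track=rewrite | github.com/J-ANet/prototipo | src/planner/engine/rebalance.py | _respects_max_subjects_per_day
-- ===== SOURCE A (Python) =====
-- from collections import defaultdict
-- from typing import Any
--
-- def _respects_max_subjects_per_day(allocations: list[dict[str, Any]], max_subjects_per_day: int) -> bool:
--     per_day_subjects: dict[str, set[str]] = defaultdict(set)
--     for alloc in allocations:
--         sid = str(alloc.get("subject_id", ""))
--         if sid in {"", "__slack__"}:
--             continue
--         per_day_subjects[str(alloc.get("date", ""))].add(sid)
--     return all(len(subjects) <= max_subjects_per_day for subjects in per_day_subjects.values())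
-- ===== SOURCE B (Python) =====
-- def _respects_max_subjects_per_day(allocations, max_subjects_per_day):
--     pairs = [(str(a.get("date", "")), str(a.get("subject_id", "")))
--              for a in allocations
--              if str(a.get("subject_id", "")) not in ("", "__slack__")]
--     dates = []
--     for d, _ in pairs:
--         if d not in dates:
--             dates.append(d)
--     return all(len({s for d2, s in pairs if d2 == d}) <= max_subjects_per_day
--                for d in dates)
-- ===== Notes on version B (the rewrite author's own statement) =====
-- stated objective: alternative
-- what changed: Replaces the defaultdict hash-accumulation of per-day subject sets by a filter-to-(date,subject) pairs pass followed by a per-distinct-date scan that rebuilds each day's subject set on demand.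
import Mathlib
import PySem

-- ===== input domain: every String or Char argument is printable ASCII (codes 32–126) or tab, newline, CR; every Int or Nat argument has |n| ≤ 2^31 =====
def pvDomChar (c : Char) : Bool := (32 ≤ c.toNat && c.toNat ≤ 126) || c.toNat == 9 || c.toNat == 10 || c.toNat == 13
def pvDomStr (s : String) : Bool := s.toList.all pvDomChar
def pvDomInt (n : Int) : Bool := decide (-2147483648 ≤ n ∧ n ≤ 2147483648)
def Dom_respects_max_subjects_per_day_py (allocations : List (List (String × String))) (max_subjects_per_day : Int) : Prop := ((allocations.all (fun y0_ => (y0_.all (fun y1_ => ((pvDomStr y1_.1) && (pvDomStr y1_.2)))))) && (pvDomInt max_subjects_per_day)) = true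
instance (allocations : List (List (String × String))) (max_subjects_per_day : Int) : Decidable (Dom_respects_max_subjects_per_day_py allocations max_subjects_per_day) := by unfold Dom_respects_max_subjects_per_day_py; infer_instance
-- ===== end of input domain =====

-- B replaces A's defaultdict accumulation of per-day sets by a filter-to-pairs pass plus a
-- per-distinct-date rescan (alternative decomposition, same return value; no speed claim).

-- ===== PORT A =====
def pvSidA (alloc : List (String × String)) : String :=
  PySem.Dict.getD (PySem.Dict.mk alloc) "subject_id" ""

def pvDateA (alloc : List (String × String)) : String :=
  PySem.Dict.getD (PySem.Dict.mk alloc) "date" ""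

def respects_max_subjects_per_day_py (allocations : List (List (String × String))) (max_subjects_per_day : Int) : Bool :=
  let per_day_subjects : PySem.Dict String (PySem.Set String) :=
    allocations.foldl (fun d alloc =>
      let sid := pvSidA alloc
      if sid == "" || sid == "__slack__" then d
      else d.modify (pvDateA alloc) [] (fun s => PySem.Set.add s sid)) PySem.Dict.empty
  (PySem.Dict.values per_day_subjects).all (fun subjects => decide (PySem.Set.len subjects ≤ max_subjects_per_day))

-- ===== PORT B =====
-- (date, subject_id) of one allocation row
def pvRowB (alloc : List (String × String)) : String × String :=
  (PySem.Dict.getD (PySem.Dict.mk alloc) "date" "", PySem.Dict.getD (PySem.Dict.mk alloc) "subject_id" "")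

def respects_max_subjects_per_day_py_alt (allocations : List (List (String × String))) (max_subjects_per_day : Int) : Bool :=
  let pairs : List (String × String) :=
    (allocations.filter (fun a => !((pvRowB a).2 == "" || (pvRowB a).2 == "__slack__"))).map pvRowB
  let dates : PySem.Set String := PySem.Set.ofList (pairs.map Prod.fst)
  dates.all (fun dt =>
    decide (PySem.Set.len (PySem.Set.ofList ((pairs.filter (fun p => p.1 == dt)).map Prod.snd)) ≤ max_subjects_per_day))

-- ===== PRECONDITION & SPEC =====
def Spec_respects_max_subjects_per_day_py (allocations : List (List (String × String))) (max_subjects_per_day : Int) (out : Bool) : Prop := out = respects_max_subjects_per_day_py_alt allocations max_subjects_per_day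
instance (allocations : List (List (String × String))) (max_subjects_per_day : Int) (out : Bool) : Decidable (Spec_respects_max_subjects_per_day_py allocations max_subjects_per_day out) := by unfold Spec_respects_max_subjects_per_day_py; infer_instance

-- ===== CLAIM (what is proved, stated in full; the proofs are below) =====
def Claim_equal_respects_max_subjects_per_day_py : Prop := ∀ (allocations : List (List (String × String))) (max_subjects_per_day : Int), Dom_respects_max_subjects_per_day_py allocations max_subjects_per_day → Spec_respects_max_subjects_per_day_py allocations max_subjects_per_day (respects_max_subjects_per_day_py allocations max_subjects_per_day)

-- ===== LEMMAS AND PROOFS =====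

-- A's defaultdict loop, over a list of (date, sid) pairs: each key's set is the set of that key's sids.
lemma getD_foldl_modify_add (l : List (String × String)) (d : PySem.Dict String (PySem.Set String)) (k : String) :
    (l.foldl (fun d p => d.modify p.1 [] (fun s => PySem.Set.add s p.2)) d).getD k []
      = PySem.Set.update (d.getD k []) ((l.filter (fun p => p.1 == k)).map Prod.snd) := by
  induction l generalizing d with
  | nil => simp [PySem.Set.update]
  | cons a t ih =>
    simp only [List.foldl_cons, ih, List.filter_cons]
    by_cases h : a.1 = k
    · simp [h, PySem.Set.update_cons]
    · simp [PySem.Dict.getD_modify, Ne.symm h, beq_eq_false_iff_ne.mpr h]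

theorem respects_max_subjects_per_day_py_spec_aux (allocations : List (List (String × String))) (m : Int) :
    respects_max_subjects_per_day_py allocations m = respects_max_subjects_per_day_py_alt allocations m := by
  unfold respects_max_subjects_per_day_py respects_max_subjects_per_day_py_alt
  have hr : pvRowB = fun a => (pvDateA a, pvSidA a) := rfl
  rw [hr]
  -- turn A's skip-loop into a fold over the filtered allocations
  have hbody : (fun (d : PySem.Dict String (PySem.Set String)) alloc =>
        let sid := pvSidA alloc
        if sid == "" || sid == "__slack__" then d
        else d.modify (pvDateA alloc) [] (fun s => PySem.Set.add s sid))
      = (fun d alloc =>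
        if !(pvSidA alloc == "" || pvSidA alloc == "__slack__")
        then d.modify (pvDateA alloc) [] (fun s => PySem.Set.add s (pvSidA alloc)) else d) := by
    funext d alloc
    by_cases h : (pvSidA alloc == "" || pvSidA alloc == "__slack__") = true <;> simp [h]
  rw [hbody, PySem.List.foldl_if_eq_foldl_filter]
  set flt := allocations.filter (fun a => !(pvSidA a == "" || pvSidA a == "__slack__")) with hflt
  set pairs := flt.map (fun a => (pvDateA a, pvSidA a)) with hpairs
  have hfold : flt.foldl (fun d a => d.modify (pvDateA a) [] (fun s => PySem.Set.add s (pvSidA a))) PySem.Dict.empty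
      = pairs.foldl (fun d p => d.modify p.1 [] (fun s => PySem.Set.add s p.2)) PySem.Dict.empty := by
    rw [hpairs, List.foldl_map]
  rw [hfold]
  set D := pairs.foldl (fun d p => d.modify p.1 [] (fun s => PySem.Set.add s p.2)) PySem.Dict.empty with hD
  have hkeys : D.keys = PySem.Set.ofList (pairs.map Prod.fst) := by
    rw [hD, PySem.Dict.keys_foldl_modify_key pairs Prod.fst [] (fun _ p => fun s => PySem.Set.add s p.2)]
    simp [PySem.Dict.keys, PySem.Dict.empty, PySem.Set.update_nil_left]
  have hnd : D.keys.Nodup := by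
    rw [hkeys]; exact PySem.Set.nodup_ofList _
  simp only [PySem.Dict.values_eq_map_keys D hnd [], List.all_map, hkeys]
  refine congrArg (List.all _) ?_
  funext k
  simp only [Function.comp, hD, getD_foldl_modify_add]
  simp [PySem.Dict.getD_empty, PySem.Set.update_nil_left]

-- ===== VERDICT (by name: the statement is the Claim_ definition above) =====
theorem respects_max_subjects_per_day_py_spec : Claim_equal_respects_max_subjects_per_day_py := by
  intro allocations m _
  exact respects_max_subjects_per_day_py_spec_aux allocations m
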